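-- pv_equiv track=rewrite | github.com/Hax0w0/KNN__K-Means | starter.py | crop_horizontal
-- ===== SOURCE A (Python) =====
-- def crop_horizontal(examples):
--     '''
--     Purpose: Crop the image horizontally to remove columns that don't have
--              any pixels. This function will crop 4 columns from the left
--
--     Notes:
--     - Each image is currently 22 x 28 (it will be 22 x 24 after)
--     '''
--     # Create a list of updated examples
--     updated_examples = []
--
--     # Create variables for crop amount and row length
--     row_pixels = 28
--     crop_amount = 4
--
--     # Loop through the list of examples
--     for example in examples:
--
--         # Get the label and attributes
--         label = example[0]
--         attributes = example[1]
--
--         # Create list to store pixels kept in image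
--         cropped_image = []
--
--         # Loop through each row and crop 4 pixels
--         for row in range(22):
--
--             # Crop 4 pixels from the row
--             row_start = row_pixels * row + crop_amount
--             row_end = row_pixels * (row+1)
--             cropped_row = attributes[row_start:row_end]
--
--             # Add the cropped row to the list of pixels kept
--             cropped_image.extend(cropped_row)
--
--         # Add the updated example back to the list
--         updated_example = [label, cropped_image]
--         updated_examples.append(updated_example)
--
--     # Return the list of updated examples
--     return updated_examples
-- ===== SOURCE B (Python) =====
-- def crop_horizontal(examples):
--     # One flat pass per image: keep pixel i iff it lies in the first 22 rows
--     # (i < 22*28) and in a column >= 4 (i % 28 >= 4).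
--     return [[e[0], [p for i, p in enumerate(e[1]) if i < 616 and i % 28 >= 4]]
--             for e in examples]
-- ===== Notes on version B (the rewrite author's own statement) =====
-- stated objective: simpler
-- what changed: Replaces the nested per-row loop with its slice-boundary arithmetic by a single flat enumerate pass selecting pixels with the modular predicate i < 616 and i % 28 >= 4.
import Mathlib
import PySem

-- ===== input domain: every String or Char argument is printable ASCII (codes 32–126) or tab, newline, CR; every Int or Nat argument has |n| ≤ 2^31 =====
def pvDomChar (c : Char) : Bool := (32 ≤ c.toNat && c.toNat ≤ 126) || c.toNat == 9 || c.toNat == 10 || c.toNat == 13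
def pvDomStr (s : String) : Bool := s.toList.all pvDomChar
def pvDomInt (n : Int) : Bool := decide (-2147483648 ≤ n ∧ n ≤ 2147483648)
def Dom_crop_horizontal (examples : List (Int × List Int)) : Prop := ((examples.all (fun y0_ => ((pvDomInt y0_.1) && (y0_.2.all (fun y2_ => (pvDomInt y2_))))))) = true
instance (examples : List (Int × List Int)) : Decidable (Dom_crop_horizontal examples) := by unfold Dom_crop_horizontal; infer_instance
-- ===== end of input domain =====

-- B replaces A's nested per-row loop with slice arithmetic by one flat indexed pass per image; objective: simpler.

-- ===== PORT A =====
def crop_horizontal (examples : List (Int × List Int)) : List (Int × List Int) :=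
  examples.foldl (fun updated_examples ex =>
    updated_examples ++ [(ex.1,
      (PySem.List.pyRange 0 22 1).foldl
        (fun acc row => acc ++ PySem.List.slice ex.2 (some (28 * row + 4)) (some (28 * (row + 1)))) [])]) []

-- ===== PORT B =====
def crop_horizontal_alt (examples : List (Int × List Int)) : List (Int × List Int) :=
  examples.map (fun e =>
    (e.1, ((PySem.List.enumerate e.2 0).filter
        (fun ip => decide (ip.1 < 616) && decide (4 ≤ ip.1 % 28))).map (·.2)))

-- ===== PRECONDITION & SPEC =====
def Spec_crop_horizontal (examples : List (Int × List Int)) (out : List (Int × List Int)) : Prop := out = crop_horizontal_alt examples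
instance (examples : List (Int × List Int)) (out : List (Int × List Int)) : Decidable (Spec_crop_horizontal examples out) := by unfold Spec_crop_horizontal; infer_instance

-- ===== CLAIM (what is proved, stated in full; the proofs are below) =====
def Claim_equal_crop_horizontal : Prop := ∀ (examples : List (Int × List Int)), Dom_crop_horizontal examples → Spec_crop_horizontal examples (crop_horizontal examples)

-- ===== LEMMAS AND PROOFS =====

-- State machine for B's flat pass: index counter i, bound b, keep x iff i < b ∧ 4 ≤ i % 28
def pvGn (b : Nat) : Nat → List Int → List Int
  | _, [] => []
  | i, x :: xs => if i < b ∧ 4 ≤ i % 28 then x :: pvGn b (i+1) xs else pvGn b (i+1) xs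

theorem pvGn_of_le (b : Nat) : ∀ (i : Nat) (l : List Int), b ≤ i → pvGn b i l = [] := by
  intro i l
  induction l generalizing i with
  | nil => intro _; rfl
  | cons x xs ih =>
      intro h
      simp only [pvGn]
      rw [if_neg (by omega)]
      exact ih (i+1) (by omega)

theorem pvGn_shift (b : Nat) : ∀ (i : Nat) (l : List Int), pvGn (b + 28) (i + 28) l = pvGn b i l := by
  intro i l
  induction l generalizing i with
  | nil => rfl
  | cons x xs ih =>
      simp only [pvGn]
      have hm : (i + 28) % 28 = i % 28 := Nat.add_mod_right i 28
      have hc : ((i + 28 < b + 28 ∧ 4 ≤ (i + 28) % 28)) ↔ (i < b ∧ 4 ≤ i % 28) := by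
        rw [hm]; omega
      by_cases h : i < b ∧ 4 ≤ i % 28
      · rw [if_pos (hc.mpr h), if_pos h, ← ih (i+1)]
      · rw [if_neg (fun hh => h (hc.mp hh)), if_neg h, ← ih (i+1)]

theorem pvGn_row : ∀ (k c : Nat) (l : List Int) (b : Nat), c + k = 28 → 28 ≤ b →
    pvGn b c l = (l.take k).drop (4 - c) ++ pvGn b 28 (l.drop k) := by
  intro k
  induction k with
  | zero =>
      intro c l b hck _
      have : c = 28 := by omega
      subst this
      simp
  | succ k ih =>
      intro c l b hck hb
      cases l with
      | nil => simp [pvGn]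
      | cons x xs =>
          have hc27 : c < 28 := by omega
          have hmod : c % 28 = c := Nat.mod_eq_of_lt hc27
          simp only [pvGn]
          by_cases h4 : 4 ≤ c
          · rw [if_pos (by rw [hmod]; exact ⟨by omega, h4⟩)]
            rw [ih (c+1) xs b (by omega) hb]
            simp only [List.take_succ_cons, List.drop_succ_cons]
            have h1 : 4 - c = 0 := by omega
            have h2 : 4 - (c+1) = 0 := by omega
            rw [h1, h2]
            simp
          · rw [if_neg (by rw [hmod]; omega)]
            rw [ih (c+1) xs b (by omega) hb]
            simp only [List.take_succ_cons, List.drop_succ_cons]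
            have h1 : 4 - c = (4 - (c+1)) + 1 := by omega
            rw [h1]
            simp

theorem pvGn_rows : ∀ (n : Nat) (l : List Int),
    pvGn (28 * n) 0 l = (List.range n).flatMap (fun r => ((l.drop (28 * r + 4)).take 24)) := by
  intro n
  induction n with
  | zero => intro l; simpa using pvGn_of_le 0 0 l (by omega)
  | succ n ih =>
      intro l
      rw [List.range_succ_eq_map, List.flatMap_cons, List.flatMap_map]
      have hrow := pvGn_row 28 0 l (28 * (n + 1)) (by omega) (by omega)
      have hshift : pvGn (28 * (n + 1)) 28 (l.drop 28) = pvGn (28 * n) 0 (l.drop 28) := by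
        have := pvGn_shift (28 * n) 0 (l.drop 28)
        simpa [Nat.mul_succ] using this
      rw [hrow, hshift, ih (l.drop 28)]
      congr 1
      · simp [List.drop_take]
      · apply List.flatMap_congr
        intro r _
        rw [List.drop_drop]
        congr 2
        omega

theorem pvFilt_eq_gn : ∀ (l : List Int) (i : Nat),
    ((PySem.List.enumerate l (i : Int)).filter
        (fun ip => decide (ip.1 < 616) && decide (4 ≤ ip.1 % 28))).map (·.2) = pvGn 616 i l := by
  intro l
  induction l with
  | nil => intro i; simp [PySem.List.enumerate_nil, pvGn]
  | cons x xs ih =>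
      intro i
      rw [PySem.List.enumerate_cons, List.filter_cons]
      have hcast : ((i : Int) + 1) = ((i + 1 : Nat) : Int) := by push_cast; ring
      have hc : ((decide ((i : Int) < 616) && decide (4 ≤ (i : Int) % 28)) = true)
          ↔ (i < 616 ∧ 4 ≤ i % 28) := by
        simp only [Bool.and_eq_true, decide_eq_true_eq]
        omega
      by_cases h : i < 616 ∧ 4 ≤ i % 28
      · rw [if_pos (hc.mpr h)]
        simp only [List.map_cons]
        rw [hcast, ih (i+1), pvGn, if_pos h]
      · rw [if_neg (fun hh => h (hc.mp hh))]
        rw [hcast, ih (i+1)]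
        simp only [pvGn]
        rw [if_neg h]

theorem pvInner_eq (l : List Int) :
    (PySem.List.pyRange 0 22 1).foldl
      (fun acc row => acc ++ PySem.List.slice l (some (28 * row + 4)) (some (28 * (row + 1)))) []
    = ((PySem.List.enumerate l 0).filter
        (fun ip => decide (ip.1 < 616) && decide (4 ≤ ip.1 % 28))).map (·.2) := by
  rw [PySem.List.foldl_append_eq_flatMap, List.nil_append]
  have h0 : ((PySem.List.enumerate l ((0 : Nat) : Int)).filter
      (fun ip => decide (ip.1 < 616) && decide (4 ≤ ip.1 % 28))).map (·.2) = pvGn 616 0 l :=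
    pvFilt_eq_gn l 0
  simp only [Nat.cast_zero] at h0
  rw [h0]
  have h1 : pvGn (28 * 22) 0 l
      = (List.range 22).flatMap (fun r => ((l.drop (28 * r + 4)).take 24)) := pvGn_rows 22 l
  norm_num at h1
  rw [h1]
  rw [PySem.List.pyRange_one]
  norm_num
  rw [List.flatMap_map]
  apply List.flatMap_congr
  intro k _
  have ha : (28 * (k : Int) + 4) = ((28 * k + 4 : Nat) : Int) := by push_cast; ring
  have hb : (28 * ((k : Int) + 1)) = (((28 * k + 4) + 24 : Nat) : Int) := by push_cast; ring
  rw [ha, hb]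
  rw [show (((28 * k + 4) + 24 : Nat) : Int) = ((28 * k + 4 : Nat) : Int) + ((24 : Nat) : Int) by push_cast; ring]
  rw [PySem.List.slice_natCast_add]

-- ===== VERDICT (by name: the statement is the Claim_ definition above) =====
theorem crop_horizontal_spec : Claim_equal_crop_horizontal := by
  intro examples _
  unfold Spec_crop_horizontal crop_horizontal crop_horizontal_alt
  rw [PySem.List.foldl_append_singleton_eq_map, List.nil_append]
  apply List.map_congr_left
  intro e _
  rw [pvInner_eq e.2]
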